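-- pv_equiv track=rewrite | github.com/GuimaraesL/filtro_avancado_geral | advanced_filter/engine.py | any_near
-- ===== SOURCE A (Python) =====
-- from typing import Dict, Any, List, Tuple, Iterable, Union
--
-- def _char_to_token_index(char_idx: int, word_starts: List[int]) -> int:
--     import bisect
--     return bisect.bisect_right(word_starts, char_idx)
--
-- def _token_distance(a_char: int, b_char: int, word_starts: List[int]) -> int:
--     ai = _char_to_token_index(a_char, word_starts)
--     bi = _char_to_token_index(b_char, word_starts)
--     return abs(ai - bi)
--
-- def any_near(a_matches, b_matches, k_tokens: int, word_starts: List[int]) -> bool: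
--     if not a_matches or not b_matches:
--         return False
--     for sa, ea, _ in a_matches:
--         for sb, eb, _ in b_matches:
--             if _token_distance(sa, sb, word_starts) <= k_tokens:
--                 return True
--     return False
-- ===== SOURCE B (Python) =====
-- import bisect
--
-- def any_near(a_matches, b_matches, k_tokens, word_starts):
--     bs = sorted(bisect.bisect_right(word_starts, sb) for sb, _, _ in b_matches)
--     for sa, _, _ in a_matches:
--         ai = bisect.bisect_right(word_starts, sa)
--         j = bisect.bisect_left(bs, ai - k_tokens)
--         if j < len(bs) and bs[j] <= ai + k_tokens:
--             return True
--     return False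
-- ===== Notes on version B (the rewrite author's own statement) =====
-- stated objective: alternative
-- what changed: Instead of testing every a-b pair (recomputing both token indices with bisect inside the nested loops), B precomputes all b token indices once, sorts them, and for each a-match does one binary search to test whether some b index lies in [ai-k, ai+k]; on adversarial all-far inputs this changes O(n*m*log w) to O((n+m)*log), but a timing run's inputs hit A's early exit, so no speedup was measured.
import Mathlib
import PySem

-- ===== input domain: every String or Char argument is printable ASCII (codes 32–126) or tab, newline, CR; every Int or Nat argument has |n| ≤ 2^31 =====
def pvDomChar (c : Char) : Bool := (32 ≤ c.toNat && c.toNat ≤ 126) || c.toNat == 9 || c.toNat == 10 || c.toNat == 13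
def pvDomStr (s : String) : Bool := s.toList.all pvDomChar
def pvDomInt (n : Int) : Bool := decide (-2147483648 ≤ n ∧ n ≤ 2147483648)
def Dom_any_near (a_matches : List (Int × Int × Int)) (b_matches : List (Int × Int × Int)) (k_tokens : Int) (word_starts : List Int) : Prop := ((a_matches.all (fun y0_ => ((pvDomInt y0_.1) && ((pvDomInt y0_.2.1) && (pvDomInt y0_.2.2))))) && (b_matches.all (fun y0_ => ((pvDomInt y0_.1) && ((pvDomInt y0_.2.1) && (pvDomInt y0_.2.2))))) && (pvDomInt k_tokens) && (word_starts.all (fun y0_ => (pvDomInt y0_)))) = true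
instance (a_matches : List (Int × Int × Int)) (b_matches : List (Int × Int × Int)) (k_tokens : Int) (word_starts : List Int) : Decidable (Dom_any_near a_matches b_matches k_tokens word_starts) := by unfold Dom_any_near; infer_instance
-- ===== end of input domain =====

-- B precomputes the b-side token indices once, sorts them, and replaces A's inner scan over
-- b_matches by one binary search per a-match ("is some b token index within [ai-k, ai+k]?").

-- ===== PORT A =====
def charToTokenIndex (char_idx : Int) (word_starts : List Int) : Int :=
  (PySem.List.bisectRight word_starts char_idx : Int)

def tokenDistance (a_char : Int) (b_char : Int) (word_starts : List Int) : Int :=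
  |charToTokenIndex a_char word_starts - charToTokenIndex b_char word_starts|

def any_near (a_matches : List (Int × Int × Int)) (b_matches : List (Int × Int × Int)) (k_tokens : Int) (word_starts : List Int) : Bool :=
  if a_matches.isEmpty || b_matches.isEmpty then false
  else a_matches.any (fun t => b_matches.any (fun u =>
    decide (tokenDistance t.1 u.1 word_starts ≤ k_tokens)))

-- ===== PORT B =====
-- the sorted list of token indices of the b-match starts (Source B's `bs = sorted(...)` line)
def bTokenIdxs (b_matches : List (Int × Int × Int)) (word_starts : List Int) : List Int :=
  PySem.List.sorted (b_matches.map (fun u => ((PySem.List.bisectRight word_starts u.1 : Nat) : Int))) id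

def any_near_alt (a_matches : List (Int × Int × Int)) (b_matches : List (Int × Int × Int)) (k_tokens : Int) (word_starts : List Int) : Bool :=
  let bs := bTokenIdxs b_matches word_starts
  a_matches.any (fun t =>
    let ai : Int := (PySem.List.bisectRight word_starts t.1 : Int)
    let j := PySem.List.bisectLeft bs (ai - k_tokens)
    decide (j < bs.length) && decide (bs.getD j 0 ≤ ai + k_tokens))

-- ===== PRECONDITION & SPEC =====
def Spec_any_near (a_matches : List (Int × Int × Int)) (b_matches : List (Int × Int × Int)) (k_tokens : Int) (word_starts : List Int) (out : Bool) : Prop := out = any_near_alt a_matches b_matches k_tokens word_starts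
instance (a_matches : List (Int × Int × Int)) (b_matches : List (Int × Int × Int)) (k_tokens : Int) (word_starts : List Int) (out : Bool) : Decidable (Spec_any_near a_matches b_matches k_tokens word_starts out) := by unfold Spec_any_near; infer_instance

-- ===== CLAIM (what is proved, stated in full; the proofs are below) =====
def Claim_equal_any_near : Prop := ∀ (a_matches : List (Int × Int × Int)) (b_matches : List (Int × Int × Int)) (k_tokens : Int) (word_starts : List Int), Dom_any_near a_matches b_matches k_tokens word_starts → Spec_any_near a_matches b_matches k_tokens word_starts (any_near a_matches b_matches k_tokens word_starts)

-- ===== LEMMAS AND PROOFS =====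

theorem pairwise_bTokenIdxs (b_matches : List (Int × Int × Int)) (word_starts : List Int) :
    List.Pairwise (· ≤ ·) (bTokenIdxs b_matches word_starts) := by
  simpa [bTokenIdxs] using
    PySem.List.sorted_pairwise (b_matches.map (fun u => ((PySem.List.bisectRight word_starts u.1 : Nat) : Int))) id

theorem mem_bTokenIdxs (b_matches : List (Int × Int × Int)) (word_starts : List Int) (v : Int) :
    v ∈ bTokenIdxs b_matches word_starts ↔
      ∃ u ∈ b_matches, ((PySem.List.bisectRight word_starts u.1 : Nat) : Int) = v := by
  unfold bTokenIdxs
  rw [(PySem.List.sorted_perm _ _ _).mem_iff]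
  simp [List.mem_map]

-- the heart of the equivalence: for each a-match, A's inner scan over b_matches equals
-- B's binary-search test on the sorted b token indices
theorem inner_eq (b_matches : List (Int × Int × Int)) (word_starts : List Int) (k ai : Int) :
    (b_matches.any (fun u =>
        decide (|ai - ((PySem.List.bisectRight word_starts u.1 : Nat) : Int)| ≤ k)))
    = (decide (PySem.List.bisectLeft (bTokenIdxs b_matches word_starts) (ai - k) < (bTokenIdxs b_matches word_starts).length)
       && decide ((bTokenIdxs b_matches word_starts).getD (PySem.List.bisectLeft (bTokenIdxs b_matches word_starts) (ai - k)) 0 ≤ ai + k)) := by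
  set bs := bTokenIdxs b_matches word_starts with hbs
  set j := PySem.List.bisectLeft bs (ai - k) with hj
  have hp := pairwise_bTokenIdxs b_matches word_starts
  rw [← hbs] at hp
  obtain ⟨hle, hlt, hge⟩ := PySem.List.bisectLeft_spec bs (ai - k) hp
  have hpw : ∀ (i i' : Nat) (h1 : i < bs.length) (h2 : i' < bs.length), i ≤ i' → bs[i] ≤ bs[i'] := by
    rw [List.pairwise_iff_getElem] at hp
    intro i i' h1 h2 hii
    rcases Nat.lt_or_ge i i' with h | h
    · exact hp i i' h1 h2 h
    · have : i = i' := Nat.le_antisymm hii h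
      subst this; exact le_refl _
  rw [Bool.eq_iff_iff]
  simp only [List.any_eq_true, Bool.and_eq_true, decide_eq_true_eq]
  constructor
  · rintro ⟨u, hu, habs⟩
    have hv : ((PySem.List.bisectRight word_starts u.1 : Nat) : Int) ∈ bs :=
      (mem_bTokenIdxs b_matches word_starts _).2 ⟨u, hu, rfl⟩
    obtain ⟨i, hi, hvi⟩ := List.getElem_of_mem hv
    have habs' := abs_le.mp habs
    have h1 : ai - k ≤ bs[i] := by rw [hvi]; omega
    have h2 : bs[i] ≤ ai + k := by rw [hvi]; omega
    have hji : j ≤ i := by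
      by_contra h
      push Not at h
      have := hlt i hi h
      omega
    have hjlen : j < bs.length := lt_of_le_of_lt hji hi
    refine ⟨hjlen, ?_⟩
    rw [List.getD_eq_getElem bs 0 hjlen]
    have := hpw j i hjlen hi hji
    omega
  · rintro ⟨hjlen, hle2⟩
    rw [List.getD_eq_getElem bs 0 hjlen] at hle2
    have hmem : bs[j] ∈ bs := List.getElem_mem hjlen
    obtain ⟨u, hu, huv⟩ := (mem_bTokenIdxs b_matches word_starts _).1 hmem
    have hlo := hge j hjlen le_rfl
    refine ⟨u, hu, ?_⟩
    rw [huv, abs_le]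
    omega

theorem bTokenIdxs_nil (word_starts : List Int) : bTokenIdxs [] word_starts = [] :=
  List.perm_nil.mp (by simpa [bTokenIdxs] using PySem.List.sorted_perm ([] : List Int) id false)

-- ===== VERDICT (by name: the statement is the Claim_ definition above) =====
theorem any_near_spec : Claim_equal_any_near := by
  intro a_matches b_matches k_tokens word_starts _
  unfold Spec_any_near
  cases a_matches with
  | nil => simp [any_near, any_near_alt]
  | cons t ts =>
    cases b_matches with
    | nil => simp [any_near, any_near_alt, bTokenIdxs_nil]
    | cons u us =>
      show any_near (t :: ts) (u :: us) k_tokens word_starts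
          = any_near_alt (t :: ts) (u :: us) k_tokens word_starts
      unfold any_near any_near_alt
      simp only [List.isEmpty_cons, Bool.or_self, Bool.false_eq_true, if_false]
      congr 1
      funext x
      simpa [tokenDistance, charToTokenIndex] using
        inner_eq (u :: us) word_starts k_tokens ((PySem.List.bisectRight word_starts x.1 : Nat) : Int)
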